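-- pv_equiv track=rewrite | github.com/cchristodoulaki/Pytheas | src/pytheas/file_utilities.py | split_lines_unquoted
-- ===== SOURCE A (Python) =====
-- def split_lines_unquoted(txt):
--     #https://stackoverflow.com/questions/24018577/parsing-a-string-in-python-how-to-split-newlines-while-ignoring-newline-inside
--     s = txt.split('\n')
--     res = []
--     cnt = 0
--     for item in s:
--         if res and cnt % 2 == 1:
--             res[-1] = res[-1] + '\n' + item
--         else:
--             res.append(item)
--             cnt = 0
--         cnt += item.count('"')
--     return res
-- ===== SOURCE B (Python) =====
-- def split_lines_unquoted(txt):
--     # single-pass character scan: keep a current-line buffer and a quote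
--     # counter; a newline ends the line only when the counter is even
--     res = []
--     buf = []
--     cnt = 0
--     for ch in txt:
--         if ch == '\n':
--             if cnt % 2 == 0:
--                 res.append(''.join(buf))
--                 buf = []
--                 cnt = 0
--             else:
--                 buf.append('\n')
--         else:
--             if ch == '"':
--                 cnt += 1
--             buf.append(ch)
--     res.append(''.join(buf))
--     return res
-- ===== Notes on version B (the rewrite author's own statement) =====
-- stated objective: alternative
-- what changed: Replaces A's split-on-newline-then-merge-pieces loop (with negative-index rejoin of the last result element) by a single character-level scan maintaining a current-line buffer and a quote counter, finalizing the buffer only at newlines with even quote parity.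
import Mathlib
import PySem

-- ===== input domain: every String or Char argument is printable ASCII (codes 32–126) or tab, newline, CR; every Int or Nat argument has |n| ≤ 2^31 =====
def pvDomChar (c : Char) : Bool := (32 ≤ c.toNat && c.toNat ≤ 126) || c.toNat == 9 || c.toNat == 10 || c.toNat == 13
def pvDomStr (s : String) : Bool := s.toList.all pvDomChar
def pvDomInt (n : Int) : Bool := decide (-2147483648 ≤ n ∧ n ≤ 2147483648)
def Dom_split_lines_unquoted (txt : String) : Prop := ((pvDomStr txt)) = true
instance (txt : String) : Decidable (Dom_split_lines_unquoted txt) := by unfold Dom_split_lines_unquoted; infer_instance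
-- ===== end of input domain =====

-- B replaces A's split-then-merge over '\n'-pieces by a single character scan
-- with a current-line buffer and quote counter (objective: alternative decomposition).

-- ===== PORT A =====
-- one step of A's loop body: state (res, cnt), item the next '\n'-piece
def pvStepA (st : List (List Char) × Nat) (item : List Char) : List (List Char) × Nat :=
  let (res, cnt) := st
  if !res.isEmpty && cnt % 2 == 1 then
    (res.dropLast ++ [(res.getLast?.getD []) ++ '\n' :: item], cnt + PySem.Chars.count item ['"'])
  else
    (res ++ [item], 0 + PySem.Chars.count item ['"'])

def split_lines_unquoted (txt : String) : List String :=
  let s := PySem.Chars.splitOn txt.toList ['\n']   -- txt.split('\n')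
  let r := s.foldl pvStepA ([], 0)
  r.1.map String.mk

-- ===== PORT B =====
-- one step of B's loop body: state (res, buf, cnt), c the next character
def pvStepB (st : List (List Char) × List Char × Nat) (c : Char) : List (List Char) × List Char × Nat :=
  let (res, buf, cnt) := st
  if c == '\n' then
    if cnt % 2 == 0 then (res ++ [buf], [], 0) else (res, buf ++ ['\n'], cnt)
  else if c == '"' then (res, buf ++ [c], cnt + 1)
  else (res, buf ++ [c], cnt)

def split_lines_unquoted_alt (txt : String) : List String :=
  let r := txt.toList.foldl pvStepB ([], [], 0)
  (r.1 ++ [r.2.1]).map String.mk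

-- ===== PRECONDITION & SPEC =====
def Spec_split_lines_unquoted (txt : String) (out : List String) : Prop := out = split_lines_unquoted_alt txt
instance (txt : String) (out : List String) : Decidable (Spec_split_lines_unquoted txt out) := by unfold Spec_split_lines_unquoted; infer_instance

-- ===== CLAIM (what is proved, stated in full; the proofs are below) =====
def Claim_equal_split_lines_unquoted : Prop := ∀ (txt : String), Dom_split_lines_unquoted txt → Spec_split_lines_unquoted txt (split_lines_unquoted txt)

-- ===== LEMMAS AND PROOFS =====

-- reference split on '\n': (first piece, remaining pieces)
def pvSp : List Char → List Char × List (List Char)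
  | [] => ([], [])
  | c :: cs =>
    if c = '\n' then ([], (pvSp cs).1 :: (pvSp cs).2)
    else (c :: (pvSp cs).1, (pvSp cs).2)

-- reference: logical lines of l, given open-line buffer buf and quote counter cnt
def pvF : List Char → List Char → Nat → List (List Char)
  | [], buf, _ => [buf]
  | c :: cs, buf, cnt =>
    if c = '\n' then
      if cnt % 2 = 0 then buf :: pvF cs [] 0 else pvF cs (buf ++ ['\n']) cnt
    else pvF cs (buf ++ [c]) (cnt + (if c = '"' then 1 else 0))

theorem pvSp_nl (cs : List Char) : pvSp ('\n' :: cs) = ([], (pvSp cs).1 :: (pvSp cs).2) := by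
  simp [pvSp]

theorem pvSp_other {c : Char} (cs : List Char) (hc : c ≠ '\n') :
    pvSp (c :: cs) = (c :: (pvSp cs).1, (pvSp cs).2) := by
  simp [pvSp, hc]

theorem pvF_nl_even (cs buf : List Char) {cnt : Nat} (h : cnt % 2 = 0) :
    pvF ('\n' :: cs) buf cnt = buf :: pvF cs [] 0 := by
  simp [pvF, h]

theorem pvF_nl_odd (cs buf : List Char) {cnt : Nat} (h : cnt % 2 = 1) :
    pvF ('\n' :: cs) buf cnt = pvF cs (buf ++ ['\n']) cnt := by
  simp [pvF, h]

theorem pvF_other {c : Char} (cs buf : List Char) (cnt : Nat) (hc : c ≠ '\n') :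
    pvF (c :: cs) buf cnt = pvF cs (buf ++ [c]) (cnt + (if c = '"' then 1 else 0)) := by
  simp [pvF, hc]

theorem pvSplitOn_go_eq (fuel : Nat) : ∀ (l cur : List Char) (acc : List (List Char)),
    l.length ≤ fuel →
    PySem.Chars.splitOn.go ['\n'] fuel l cur acc
      = acc.reverse ++ (cur.reverse ++ (pvSp l).1) :: (pvSp l).2 := by
  induction fuel with
  | zero =>
    intro l cur acc h
    have : l = [] := List.eq_nil_of_length_eq_zero (Nat.le_zero.mp h)
    subst this
    simp [PySem.Chars.splitOn.go, pvSp]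
  | succ f ih =>
    intro l cur acc h
    cases l with
    | nil => simp [PySem.Chars.splitOn.go, pvSp]
    | cons c rest =>
      simp only [PySem.Chars.splitOn.go]
      by_cases hc : c = '\n'
      · subst hc
        have hpre : List.isPrefixOf ['\n'] ('\n' :: rest) = true := by
          simp [List.isPrefixOf]
        rw [if_pos hpre]
        have := ih rest [] (cur.reverse :: acc) (by simpa using Nat.le_of_succ_le_succ h)
        simp only [List.length_singleton, List.drop_one, List.tail_cons] at this ⊢
        rw [this]
        simp [pvSp]
      · have hpre : List.isPrefixOf ['\n'] (c :: rest) = false := by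
          simp [List.isPrefixOf, Ne.symm hc]
        rw [if_neg (by simp [hpre])]
        rw [ih rest (c :: cur) acc (by simpa using Nat.le_of_succ_le_succ h)]
        simp [pvSp, hc]

theorem pvSplitOn_eq (l : List Char) :
    PySem.Chars.splitOn l ['\n'] = (pvSp l).1 :: (pvSp l).2 := by
  have := pvSplitOn_go_eq (l.length + 1) l [] [] (Nat.le_succ _)
  simpa [PySem.Chars.splitOn] using this

theorem pvCount_go_eq (fuel : Nat) : ∀ (l : List Char) (acc : Nat),
    l.length ≤ fuel →
    PySem.Chars.count.go ['"'] fuel l acc = acc + l.count '"' := by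
  induction fuel with
  | zero =>
    intro l acc h
    have : l = [] := List.eq_nil_of_length_eq_zero (Nat.le_zero.mp h)
    subst this; simp [PySem.Chars.count.go]
  | succ f ih =>
    intro l acc h
    cases l with
    | nil => simp [PySem.Chars.count.go]
    | cons c rest =>
      simp only [PySem.Chars.count.go]
      by_cases hc : c = '"'
      · subst hc
        have hpre : List.isPrefixOf ['"'] ('"' :: rest) = true := by
          simp [List.isPrefixOf]
        rw [if_pos hpre]
        simp only [List.length_singleton, List.drop_one, List.tail_cons]
        rw [ih rest (acc + 1) (by simpa using Nat.le_of_succ_le_succ h)]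
        simp [List.count_cons]
        omega
      · have hpre : List.isPrefixOf ['"'] (c :: rest) = false := by
          simp [List.isPrefixOf, Ne.symm hc]
        rw [if_neg (by simp [hpre])]
        rw [ih rest acc (by simpa using Nat.le_of_succ_le_succ h)]
        simp [List.count_cons, hc]

theorem pvCount_eq (l : List Char) : PySem.Chars.count l ['"'] = l.count '"' := by
  have := pvCount_go_eq l.length l 0 (Nat.le_refl _)
  simpa [PySem.Chars.count] using this

-- A's fold over the pieces of cs (first piece extended by pre), from a nonempty res
theorem pvA_fold (cs : List Char) : ∀ (pre last : List Char) (res0 : List (List Char)) (cnt : Nat),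
    (List.foldl pvStepA (res0 ++ [last], cnt) ((pre ++ (pvSp cs).1) :: (pvSp cs).2)).1
      = res0 ++ (if cnt % 2 = 1
                 then pvF cs (last ++ '\n' :: pre) (cnt + pre.count '"')
                 else [last] ++ pvF cs pre (pre.count '"')) := by
  induction cs with
  | nil =>
    intro pre last res0 cnt
    by_cases hodd : cnt % 2 = 1
    · simp [pvSp, pvF, pvStepA, hodd, List.getLast?_concat, List.dropLast_concat]
    · simp [pvSp, pvF, pvStepA, hodd]
  | cons c cs' ih =>
    intro pre last res0 cnt
    by_cases hc : c = '\n'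
    · subst hc
      rw [pvSp_nl]
      by_cases hodd : cnt % 2 = 1
      · have hstep : pvStepA (res0 ++ [last], cnt) (pre ++ ([] : List Char))
            = (res0 ++ [last ++ '\n' :: pre], cnt + pre.count '"') := by
          simp [pvStepA, hodd, List.getLast?_concat, List.dropLast_concat, pvCount_eq]
        rw [List.foldl_cons, hstep]
        have h2 := ih [] (last ++ '\n' :: pre) res0 (cnt + pre.count '"')
        simp only [List.nil_append, List.count_nil, Nat.add_zero] at h2
        rw [h2, if_pos hodd]
        by_cases hodd2 : (cnt + pre.count '"') % 2 = 1
        · rw [if_pos hodd2, pvF_nl_odd cs' _ hodd2]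
        · rw [if_neg hodd2, pvF_nl_even cs' _ (by omega)]
          simp
      · have hstep : pvStepA (res0 ++ [last], cnt) (pre ++ ([] : List Char))
            = ((res0 ++ [last]) ++ [pre], pre.count '"') := by
          simp [pvStepA, hodd, pvCount_eq]
        rw [List.foldl_cons, hstep]
        have h2 := ih [] pre (res0 ++ [last]) (pre.count '"')
        simp only [List.nil_append, List.count_nil, Nat.add_zero] at h2
        rw [h2, if_neg hodd]
        by_cases hodd2 : pre.count '"' % 2 = 1
        · rw [if_pos hodd2, pvF_nl_odd cs' _ hodd2]
          simp
        · rw [if_neg hodd2, pvF_nl_even cs' _ (by omega)]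
          simp
    · rw [pvSp_other cs' hc]
      have hassoc : pre ++ c :: (pvSp cs').1 = (pre ++ [c]) ++ (pvSp cs').1 := by simp
      rw [show (pre ++ c :: (pvSp cs').1) :: (pvSp cs').2
            = ((pre ++ [c]) ++ (pvSp cs').1) :: (pvSp cs').2 from by rw [hassoc]]
      rw [ih (pre ++ [c]) last res0 cnt]
      have hcnt : (pre ++ [c]).count '"' = pre.count '"' + (if c = '"' then 1 else 0) := by
        by_cases hq : c = '"' <;> simp [List.count_append, hq]
      rw [hcnt, pvF_other cs' pre (pre.count '"') hc,
          pvF_other cs' (last ++ '\n' :: pre) (cnt + pre.count '"') hc]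
      by_cases hodd : cnt % 2 = 1
      · rw [if_pos hodd, if_pos hodd]
        simp [Nat.add_assoc]
      · rw [if_neg hodd, if_neg hodd]

-- A's fold from the initial empty state
theorem pvA_top (cs : List Char) : ∀ (pre : List Char) (cnt : Nat),
    (List.foldl pvStepA ([], cnt) ((pre ++ (pvSp cs).1) :: (pvSp cs).2)).1
      = pvF cs pre (pre.count '"') := by
  induction cs with
  | nil => intro pre cnt; simp [pvSp, pvF, pvStepA]
  | cons c cs' ih =>
    intro pre cnt
    by_cases hc : c = '\n'
    · subst hc
      rw [pvSp_nl]
      have hstep : pvStepA ([], cnt) (pre ++ ([] : List Char)) = ([pre], pre.count '"') := by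
        simp [pvStepA, pvCount_eq]
      rw [List.foldl_cons, hstep]
      have h2 := pvA_fold cs' [] pre [] (pre.count '"')
      simp only [List.nil_append, List.count_nil, Nat.add_zero] at h2
      rw [h2]
      by_cases hodd : pre.count '"' % 2 = 1
      · rw [if_pos hodd, pvF_nl_odd cs' _ hodd]
      · rw [if_neg hodd, pvF_nl_even cs' _ (by omega)]
        simp
    · rw [pvSp_other cs' hc]
      rw [show (pre ++ c :: (pvSp cs').1) :: (pvSp cs').2
            = ((pre ++ [c]) ++ (pvSp cs').1) :: (pvSp cs').2 from by simp]
      rw [ih (pre ++ [c]) cnt]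
      have hcnt : (pre ++ [c]).count '"' = pre.count '"' + (if c = '"' then 1 else 0) := by
        by_cases hq : c = '"' <;> simp [List.count_append, hq]
      rw [hcnt, pvF_other cs' pre (pre.count '"') hc]

-- B's fold in terms of pvF
theorem pvB_fold (l : List Char) : ∀ (res : List (List Char)) (buf : List Char) (cnt : Nat),
    (l.foldl pvStepB (res, buf, cnt)).1 ++ [(l.foldl pvStepB (res, buf, cnt)).2.1]
      = res ++ pvF l buf cnt := by
  induction l with
  | nil => intro res buf cnt; simp [pvF]
  | cons c cs ih =>
    intro res buf cnt
    by_cases hc : c = '\n'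
    · subst hc
      by_cases he : cnt % 2 = 0
      · have hstep : pvStepB (res, buf, cnt) '\n' = (res ++ [buf], [], 0) := by
          simp [pvStepB, he]
        rw [List.foldl_cons, hstep, ih, pvF_nl_even cs buf he]
        simp
      · have hstep : pvStepB (res, buf, cnt) '\n' = (res, buf ++ ['\n'], cnt) := by
          simp [pvStepB, he]
        rw [List.foldl_cons, hstep, ih, pvF_nl_odd cs buf (by omega)]
    · have hstep : pvStepB (res, buf, cnt) c
          = (res, buf ++ [c], cnt + (if c = '"' then 1 else 0)) := by
        by_cases hq : c = '"' <;> simp [pvStepB, hc, hq]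
      rw [List.foldl_cons, hstep, ih, pvF_other cs buf cnt hc]

-- ===== VERDICT (by name: the statement is the Claim_ definition above) =====
theorem split_lines_unquoted_spec : Claim_equal_split_lines_unquoted := by
  intro txt _
  unfold Spec_split_lines_unquoted split_lines_unquoted split_lines_unquoted_alt
  rw [pvSplitOn_eq]
  have hA := pvA_top txt.toList [] 0
  simp only [List.nil_append, List.count_nil] at hA
  have hB := pvB_fold txt.toList [] [] 0
  simp only [List.nil_append] at hB
  simp only [hA, hB]
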